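-- pv_equiv track=rewrite | github.com/cloudcafes/nifty_trend_engine | classify.py | count_same_sign
-- ===== SOURCE A (Python) =====
-- def count_same_sign(hist):
--     """Count consecutive bars of same sign momentum from the end."""
--     if not hist:
--         return 0
--     last = hist[-1]
--     if last == 0:
--         return 0
--     sign = 1 if last > 0 else -1
--     count = 0
--     for val in reversed(hist):
--         if val == 0:
--             break
--         if (val > 0 and sign > 0) or (val < 0 and sign < 0):
--             count += 1
--         else:
--             break
--     return count
-- ===== SOURCE B (Python) =====
-- def count_same_sign(hist):
--     """Count consecutive bars of same sign momentum from the end."""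
--     run = 0
--     cur_sign = 0
--     for val in hist:
--         if val == 0:
--             run = 0
--         else:
--             s = 1 if val > 0 else -1
--             if s == cur_sign:
--                 run += 1
--             else:
--                 run = 1
--                 cur_sign = s
--     return run
-- ===== Notes on version B (the rewrite author's own statement) =====
-- stated objective: alternative
-- what changed: Replaced the backward scan from the end (read the last element first, then iterate the reversed list with break) by a single forward pass maintaining a (run, cur_sign) state, with zeros resetting the run.
import Mathlib
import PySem

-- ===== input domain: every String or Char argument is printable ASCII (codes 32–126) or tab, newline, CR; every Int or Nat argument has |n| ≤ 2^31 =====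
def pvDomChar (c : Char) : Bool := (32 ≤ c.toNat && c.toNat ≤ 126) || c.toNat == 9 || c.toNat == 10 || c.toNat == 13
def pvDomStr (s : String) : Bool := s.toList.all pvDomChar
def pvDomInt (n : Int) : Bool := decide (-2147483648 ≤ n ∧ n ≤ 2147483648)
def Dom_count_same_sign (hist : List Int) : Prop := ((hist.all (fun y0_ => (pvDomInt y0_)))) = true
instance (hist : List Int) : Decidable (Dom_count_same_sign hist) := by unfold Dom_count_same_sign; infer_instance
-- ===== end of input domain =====

-- B replaces A's backward scan with break by one forward pass over (run, cur_sign) state; objective: alternative decomposition, same cost.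


-- ===== PORT A =====
-- A's for-loop over reversed(hist) with its two breaks, count as accumulator
def csLoopA (sign : Int) (count : Int) : List Int → Int
  | [] => count
  | v :: vs =>
    if v = 0 then count
    else if (v > 0 ∧ sign > 0) ∨ (v < 0 ∧ sign < 0) then csLoopA sign (count + 1) vs
    else count

def count_same_sign (hist : List Int) : Int :=
  if hist = [] then 0
  else
    match PySem.List.pyGet? hist (-1) with
    | none => 0  -- unreachable: hist ≠ []
    | some last =>
      if last = 0 then 0
      else
        let sign : Int := if last > 0 then 1 else -1
        csLoopA sign 0 hist.reverse

-- ===== PORT B =====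
-- one forward step of Source B's loop on the state (run, cur_sign)
def csStepB (st : Int × Int) (val : Int) : Int × Int :=
  if val = 0 then (0, st.2)
  else
    let s : Int := if val > 0 then 1 else -1
    if s = st.2 then (st.1 + 1, st.2) else (1, s)

def count_same_sign_alt (hist : List Int) : Int :=
  (hist.foldl csStepB (0, 0)).1

-- ===== PRECONDITION & SPEC =====
def Spec_count_same_sign (hist : List Int) (out : Int) : Prop := out = count_same_sign_alt hist
instance (hist : List Int) (out : Int) : Decidable (Spec_count_same_sign hist out) := by unfold Spec_count_same_sign; infer_instance

-- ===== CLAIM (what is proved, stated in full; the proofs are below) =====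
def Claim_equal_count_same_sign : Prop := ∀ (hist : List Int), Dom_count_same_sign hist → Spec_count_same_sign hist (count_same_sign hist)

-- ===== LEMMAS AND PROOFS =====

-- sign of the first nonzero element (0 if none)
def csFirstNZ : List Int → Int
  | [] => 0
  | v :: vs => if v = 0 then csFirstNZ vs else if v > 0 then 1 else -1

-- trailing-run value A computes on the reversed list r
def csTrail : List Int → Int
  | [] => 0
  | v :: vs => if v = 0 then 0 else csLoopA (if v > 0 then 1 else -1) 0 (v :: vs)

theorem csLoopA_acc (r : List Int) (s c : Int) :
    csLoopA s c r = c + csLoopA s 0 r := by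
  induction r generalizing c with
  | nil => simp [csLoopA]
  | cons v vs ih =>
    simp only [csLoopA]
    split_ifs with h1 h2
    · simp
    · rw [ih (c + 1), ih (0 + 1)]; ring
    · simp

theorem csLoopA_miss (r : List Int) (s c : Int) (hs : s = 1 ∨ s = -1)
    (h : csFirstNZ r ≠ s) : csLoopA s c r = c := by
  induction r generalizing c with
  | nil => simp [csLoopA]
  | cons v vs ih =>
    simp only [csLoopA]
    by_cases hv : v = 0
    · simp [hv]
    · simp only [hv]
      have hfz : csFirstNZ (v :: vs) = if v > 0 then 1 else -1 := by
        simp [csFirstNZ, hv]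
      have : ¬ ((v > 0 ∧ s > 0) ∨ (v < 0 ∧ s < 0)) := by
        rcases hs with rfl | rfl <;> rw [hfz] at h <;> split_ifs at h <;> omega
      simp [this]

theorem csLoopA_hit (r : List Int) (s : Int)
    (h : csFirstNZ r = s) : csLoopA s 0 r = csTrail r := by
  cases r with
  | nil => simp [csLoopA, csTrail]
  | cons v vs =>
    by_cases hv : v = 0
    · simp [csLoopA, csTrail, hv]
    · have hfz : csFirstNZ (v :: vs) = if v > 0 then 1 else -1 := by
        simp [csFirstNZ, hv]
      rw [hfz] at h
      simp [csTrail, hv, ← h]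

theorem csFoldB (l : List Int) :
    l.foldl csStepB (0, 0) = (csTrail l.reverse, csFirstNZ l.reverse) := by
  induction l using List.reverseRecOn with
  | nil => simp [csTrail, csFirstNZ]
  | append_singleton l x ih =>
    rw [List.foldl_append, ih]
    simp only [List.foldl_cons, List.foldl_nil, List.reverse_append, List.reverse_cons,
      List.reverse_nil, List.nil_append, List.cons_append]
    by_cases hx : x = 0
    · simp [csStepB, csTrail, csFirstNZ, hx]
    · have hfz : csFirstNZ (x :: l.reverse) = if x > 0 then 1 else -1 := by
        simp [csFirstNZ, hx]
      have hs : (if x > 0 then (1:Int) else -1) = 1 ∨ (if x > 0 then (1:Int) else -1) = -1 := by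
        split_ifs <;> simp
      have hsame : ((x > 0 ∧ (if x > 0 then (1:Int) else -1) > 0) ∨
          (x < 0 ∧ (if x > 0 then (1:Int) else -1) < 0)) := by
        split_ifs with h <;> omega
      simp only [csStepB, hx]
      by_cases hc : (if x > 0 then (1:Int) else -1) = csFirstNZ l.reverse
      · simp only [← hc]
        have h0 : csTrail (x :: l.reverse) = csLoopA (if x > 0 then 1 else -1) 0 (x :: l.reverse) := by
          simp [csTrail, hx]
        rw [h0]
        simp only [csLoopA, if_neg hx, if_pos hsame]
        rw [csLoopA_acc, csLoopA_hit l.reverse _ hc.symm, hfz]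
        simp [add_comm]
      · have hc' : ¬ ((if x > 0 then (1:Int) else -1) = csFirstNZ l.reverse) := hc
        simp only [if_neg hc']
        have h0 : csTrail (x :: l.reverse) = csLoopA (if x > 0 then 1 else -1) 0 (x :: l.reverse) := by
          simp [csTrail, hx]
        rw [h0]
        simp only [csLoopA, if_neg hx, if_pos hsame]
        rw [csLoopA_acc, csLoopA_miss l.reverse _ 0 hs (fun h => hc' h.symm), hfz]
        simp

-- A equals the trailing-run value of the reversed list
theorem csA_eq_trail (hist : List Int) : count_same_sign hist = csTrail hist.reverse := by
  unfold count_same_sign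
  by_cases h : hist = []
  · simp [h, csTrail]
  · rw [if_neg h, PySem.List.pyGet?_neg_one]
    have hne : hist.reverse ≠ [] := by simpa using h
    obtain ⟨v, vs, hr⟩ := List.exists_cons_of_ne_nil hne
    have hl : hist.getLast? = some v := by
      rw [← List.head?_reverse, hr]; rfl
    rw [hl, hr]
    by_cases hv : v = 0
    · simp [hv, csTrail]
    · simp [csTrail, hv]

-- ===== VERDICT (by name: the statement is the Claim_ definition above) =====
theorem count_same_sign_spec : Claim_equal_count_same_sign := by
  intro hist _
  unfold Spec_count_same_sign count_same_sign_alt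
  rw [csFoldB, csA_eq_trail]
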